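-- pv_equiv track=rewrite | github.com/fu-group/fu | src/fu_molec.py | FindNmbInGrpLst
-- ===== SOURCE A (Python) =====
-- def FindNmbInGrpLst(ia,grplst):
--     # 2013.2 KK
--     ig=-1
--     if len(grplst) <= 0: return ig
--     for i in range(len(grplst)):
--         for j in grplst[i]:
--             if j == ia:
--                 ig=i; break
--     return ig
-- ===== SOURCE B (Python) =====
-- def FindNmbInGrpLst(ia, grplst):
--     for i in range(len(grplst) - 1, -1, -1):
--         if ia in grplst[i]:
--             return i
--     return -1
-- ===== Notes on version B (the rewrite author's own statement) =====
-- stated objective: simpler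
-- what changed: Scans the groups backwards and returns the first matching index immediately, instead of A's forward scan that keeps overwriting a running last-match accumulator.
import Mathlib
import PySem

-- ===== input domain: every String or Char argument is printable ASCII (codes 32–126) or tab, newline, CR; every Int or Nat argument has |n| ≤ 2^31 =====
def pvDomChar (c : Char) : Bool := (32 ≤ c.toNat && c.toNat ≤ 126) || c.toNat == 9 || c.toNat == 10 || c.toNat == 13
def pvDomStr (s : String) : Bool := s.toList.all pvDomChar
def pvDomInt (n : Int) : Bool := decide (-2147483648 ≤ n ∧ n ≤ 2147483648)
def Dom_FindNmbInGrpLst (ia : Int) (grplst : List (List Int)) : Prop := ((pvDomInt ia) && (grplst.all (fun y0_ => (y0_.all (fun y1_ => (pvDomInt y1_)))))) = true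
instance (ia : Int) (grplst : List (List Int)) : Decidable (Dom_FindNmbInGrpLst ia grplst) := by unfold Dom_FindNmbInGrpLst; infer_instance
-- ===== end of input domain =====

-- B scans the groups backwards and returns the first matching index immediately,
-- instead of A's forward scan with an overwritten last-match accumulator (objective: simpler).


-- ===== PORT A =====
-- forward loop over all indices; the inner for/break amounts to: if ia occurs in grplst[i], set ig := i
def FindNmbInGrpLst (ia : Int) (grplst : List (List Int)) : Int :=
  let ig : Int := -1
  if grplst.length ≤ 0 then ig
  else
    (List.range grplst.length).foldl
      (fun ig i => if (grplst.getD i []).contains ia then (i : Int) else ig) ig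

-- ===== PORT B =====
-- countdown loop: fuel k means "indices k-1, k-2, …, 0 remain"; return on first match
def FindNmbInGrpLst_altGo (ia : Int) (grplst : List (List Int)) : Nat → Int
  | 0 => -1
  | Nat.succ k => if (grplst.getD k []).contains ia then (k : Int) else FindNmbInGrpLst_altGo ia grplst k

def FindNmbInGrpLst_alt (ia : Int) (grplst : List (List Int)) : Int :=
  FindNmbInGrpLst_altGo ia grplst grplst.length

-- ===== PRECONDITION & SPEC =====
def Spec_FindNmbInGrpLst (ia : Int) (grplst : List (List Int)) (out : Int) : Prop := out = FindNmbInGrpLst_alt ia grplst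
instance (ia : Int) (grplst : List (List Int)) (out : Int) : Decidable (Spec_FindNmbInGrpLst ia grplst out) := by unfold Spec_FindNmbInGrpLst; infer_instance

-- ===== CLAIM (what is proved, stated in full; the proofs are below) =====
def Claim_equal_FindNmbInGrpLst : Prop := ∀ (ia : Int) (grplst : List (List Int)), Dom_FindNmbInGrpLst ia grplst → Spec_FindNmbInGrpLst ia grplst (FindNmbInGrpLst ia grplst)

-- ===== LEMMAS AND PROOFS =====
lemma foldl_eq_altGo (ia : Int) (grplst : List (List Int)) (n : Nat) :
    (List.range n).foldl
      (fun ig i => if (grplst.getD i []).contains ia then (i : Int) else ig) (-1)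
      = FindNmbInGrpLst_altGo ia grplst n := by
  induction n with
  | zero => rfl
  | succ k ih =>
    rw [List.range_succ, List.foldl_append, ih]
    simp only [List.foldl_cons, List.foldl_nil, FindNmbInGrpLst_altGo]

-- ===== VERDICT (by name: the statement is the Claim_ definition above) =====
theorem FindNmbInGrpLst_spec : Claim_equal_FindNmbInGrpLst := by
  intro ia grplst _
  unfold Spec_FindNmbInGrpLst FindNmbInGrpLst FindNmbInGrpLst_alt
  by_cases h : grplst.length ≤ 0
  · have : grplst.length = 0 := Nat.le_zero.mp h
    simp [this, FindNmbInGrpLst_altGo]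
  · simp only [h, if_false]
    exact foldl_eq_altGo ia grplst grplst.length
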